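-- pv_equiv track=rewrite | github.com/diegotpereira/multiplas-respostas-desafio | algorithms/implementation/picking-numbers/picking-numbers-python/tests/pickingNumbers.py | pickingNumbers
-- ===== SOURCE A (Python) =====
-- def pickingNumbers(arr):
--
--     # Inicializa uma variável para armazenar o comprimento máximo do subconjunto.
--     comprimentoMaximo = 0
--
--     # Itera sobre cada número na lista.
--     for numero in arr:
--
--         # Inicializa um contador para contar elementos que são iguais ao número ou têm diferença de 1.
--         contador = 0
--
--         # Itera sobre cada elemento na lista para comparar com o número atual.
--         for compare in arr:
--
--             # Verifica se o número é igual ou tem diferença de 1 com o elemento comparado.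
--             if (numero == compare or numero - compare == 1):
--
--                 # Incrementa o contador se a condição for atendida.
--                 contador += 1
--
--
--             if (contador > comprimentoMaximo):
--
--                 # Atualiza o comprimento máximo se o contador atual for maior que o valor atual de 'comprimentoMaximo'.
--                 comprimentoMaximo = contador
--
--     # Retorna o comprimento máximo do subconjunto.
--     return comprimentoMaximo
-- ===== SOURCE B (Python) =====
-- def pickingNumbers(arr):
--     count = {}
--     for x in arr:
--         count[x] = count.get(x, 0) + 1
--     best = 0
--     for v, c in count.items():
--         s = c + count.get(v - 1, 0)
--         if s > best:
--             best = s
--     return best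
-- ===== Notes on version B (the rewrite author's own statement) =====
-- stated objective: faster
-- what changed: Replaced the quadratic all-pairs scan by a single frequency-count pass: build a counter dict, then take the max of count[v]+count[v-1] over the distinct values.
import Mathlib
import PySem

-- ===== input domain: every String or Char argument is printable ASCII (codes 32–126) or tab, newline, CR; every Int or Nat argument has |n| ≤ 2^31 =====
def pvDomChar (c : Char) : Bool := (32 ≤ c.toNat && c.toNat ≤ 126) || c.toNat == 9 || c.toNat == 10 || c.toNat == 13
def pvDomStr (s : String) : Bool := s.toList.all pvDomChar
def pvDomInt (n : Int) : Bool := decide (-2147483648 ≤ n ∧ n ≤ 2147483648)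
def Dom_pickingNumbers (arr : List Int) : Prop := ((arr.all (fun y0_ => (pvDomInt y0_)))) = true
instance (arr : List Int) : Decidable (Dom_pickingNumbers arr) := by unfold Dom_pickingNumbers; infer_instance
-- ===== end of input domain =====

-- B replaces A's quadratic all-pairs scan by one frequency-count pass (counter dict, then max of count[v]+count[v-1]): asymptotically faster.


-- ===== PORT A =====
-- literal transliteration of A: outer loop over arr; inner loop carrying (contador, comprimentoMaximo)
def pickingNumbers (arr : List Int) : Int :=
  arr.foldl (fun comprimentoMaximo numero =>
    (arr.foldl (fun (st : Int × Int) compare =>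
      let contador := if numero == compare || numero - compare == 1 then st.1 + 1 else st.1
      (contador, if contador > st.2 then contador else st.2))
      (0, comprimentoMaximo)).2) 0

-- ===== PORT B =====
-- literal transliteration of B: build the counter dict, then one pass over its items
def pickingNumbers_alt (arr : List Int) : Int :=
  let count := arr.foldl (fun d x => d.insert x (d.getD x 0 + 1)) PySem.Dict.empty
  count.items.foldl (fun best vc =>
    let s := vc.2 + count.getD (vc.1 - 1) 0
    if s > best then s else best) 0

-- ===== PRECONDITION & SPEC =====
def Spec_pickingNumbers (arr : List Int) (out : Int) : Prop := out = pickingNumbers_alt arr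
instance (arr : List Int) (out : Int) : Decidable (Spec_pickingNumbers arr out) := by unfold Spec_pickingNumbers; infer_instance

-- ===== CLAIM (what is proved, stated in full; the proofs are below) =====
def Claim_equal_pickingNumbers : Prop := ∀ (arr : List Int), Dom_pickingNumbers arr → Spec_pickingNumbers arr (pickingNumbers arr)

-- ===== LEMMAS AND PROOFS =====

-- the common value both programs take the max of: #occurrences of v plus #occurrences of v-1
def pvF (arr : List Int) (v : Int) : Int := (arr.count v : Int) + (arr.count (v - 1) : Int)

-- A's "if contador > max then contador else max" is a max
lemma if_gt_eq_max (a b : Int) : (if b > a then b else a) = max a b := by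
  rw [max_def]; split_ifs <;> omega

-- fold the running max: max accumulated so far, then the final count
lemma max_chain (m c N : Int) (h0 : 0 ≤ N) : max (max m c) (c + N) = max m (c + N) := by
  rw [max_assoc]
  congr 1
  exact max_eq_right (by omega)

-- A's inner loop on a nonempty list returns (c0 + matches, max m0 (c0 + matches))
lemma innerA (numero : Int) (l : List Int) (c0 m0 : Int) (hne : l ≠ []) :
    l.foldl (fun (st : Int × Int) compare =>
      let contador := if numero == compare || numero - compare == 1 then st.1 + 1 else st.1
      (contador, if contador > st.2 then contador else st.2)) (c0, m0)
    = (c0 + (l.countP (fun compare => numero == compare || numero - compare == 1) : Int),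
       max m0 (c0 + (l.countP (fun compare => numero == compare || numero - compare == 1) : Int))) := by
  induction l generalizing c0 m0 with
  | nil => exact absurd rfl hne
  | cons x xs ih =>
    rw [List.foldl_cons]
    dsimp only
    rcases eq_or_ne xs [] with hxs | hxs
    · subst hxs
      rw [List.foldl_nil, List.countP_cons, List.countP_nil, if_gt_eq_max]
      by_cases h : (numero == x || numero - x == 1) = true <;> simp [h]
    · rw [ih _ _ hxs, List.countP_cons, if_gt_eq_max]
      have h0 : (0 : Int) ≤ (xs.countP (fun compare => numero == compare || numero - compare == 1) : Int) :=
        Int.natCast_nonneg _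
      by_cases h : (numero == x || numero - x == 1) = true
      · simp only [h, if_true]
        have hc : (c0 + ((xs.countP (fun compare => numero == compare || numero - compare == 1) + 1 : Nat) : Int))
            = (c0 + 1) + (xs.countP (fun compare => numero == compare || numero - compare == 1) : Int) := by
          push_cast; omega
        refine Prod.ext (by rw [hc]) ?_
        rw [hc]
        exact max_chain _ _ _ h0
      · simp only [if_neg h]
        have hc : (c0 + ((xs.countP (fun compare => numero == compare || numero - compare == 1) + 0 : Nat) : Int))
            = c0 + (xs.countP (fun compare => numero == compare || numero - compare == 1) : Int) := by
          push_cast; omega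
        refine Prod.ext (by rw [hc]) ?_
        rw [hc]
        exact max_chain _ _ _ h0

-- the inner countP is pvF
lemma countP_eq_pvF (arr : List Int) (v : Int) :
    (arr.countP (fun compare => v == compare || v - compare == 1) : Int) = pvF arr v := by
  unfold pvF
  induction arr with
  | nil => simp
  | cons x xs ih =>
    simp only [List.countP_cons, List.count_cons]
    rcases eq_or_ne x v with h1 | h1
    · subst h1
      have hne : ¬ (x = x - 1) := by omega
      simp only [if_true, beq_self_eq_true]
      simp [hne]
      omega
    · rcases eq_or_ne x (v - 1) with h2 | h2
      · have hc : (v == x || v - x == 1) = true := by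
          simp only [Bool.or_eq_true, beq_iff_eq]; omega
        simp only [hc, if_true]
        simp [h2]
        omega
      · have hc : (v == x || v - x == 1) = false := by
          simp only [Bool.or_eq_false_iff, beq_eq_false_iff_ne, ne_eq]
          constructor
          · intro he; exact h1 he.symm
          · omega
        simp only [hc]
        simp [h1, h2]
        exact ih

-- a running max of a projection started at 0 depends only on the set of elements
lemma foldl_maxF_eq (f : Int → Int) (l1 l2 : List Int) (hmem : ∀ x, x ∈ l1 ↔ x ∈ l2) :
    l1.foldl (fun m v => max m (f v)) 0 = l2.foldl (fun m v => max m (f v)) 0 := by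
  have key : ∀ (l l' : List Int), (∀ x, x ∈ l → x ∈ l') →
      l.foldl (fun m v => max m (f v)) 0 ≤ l'.foldl (fun m v => max m (f v)) 0 := by
    intro l l' hsub
    have hlb := PySem.List.le_foldl_max_int l' f 0
    have hm : l.foldl (fun m v => max m (f v)) 0 = (l.map f).foldl max 0 := List.foldl_map.symm
    rw [hm]
    rcases PySem.List.foldl_max_mem (l.map f) 0 with h | h
    · rw [h]; exact hlb.1
    · rcases List.mem_map.mp h with ⟨x, hx, hfx⟩
      rw [← hfx]
      exact hlb.2 x (hsub x hx)
  exact le_antisymm (key l1 l2 (fun x => (hmem x).mp)) (key l2 l1 (fun x => (hmem x).mpr))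

-- A computes the running max of pvF over arr
lemma pickingNumbers_eq_maxF (arr : List Int) :
    pickingNumbers arr = arr.foldl (fun m v => max m (pvF arr v)) 0 := by
  unfold pickingNumbers
  rcases eq_or_ne arr [] with h | h
  · simp [h]
  · apply PySem.List.foldl_congr_mem
    intro m v _hv
    rw [innerA v arr 0 m h, zero_add, countP_eq_pvF]

-- B computes the running max of pvF over the distinct elements of arr
lemma pickingNumbers_alt_eq_maxF (arr : List Int) :
    pickingNumbers_alt arr = (PySem.Set.ofList arr).foldl (fun m v => max m (pvF arr v)) 0 := by
  unfold pickingNumbers_alt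
  simp only [PySem.Dict.foldl_insert_getD_add_one_eq_counter]
  rw [PySem.Dict.items_counter, List.foldl_map]
  apply PySem.List.foldl_congr_mem
  intro m v _hv
  dsimp only
  rw [PySem.Dict.getD_counter, if_gt_eq_max]
  rfl

-- ===== VERDICT (by name: the statement is the Claim_ definition above) =====
theorem pickingNumbers_spec : Claim_equal_pickingNumbers := by
  intro arr _hdom
  unfold Spec_pickingNumbers
  rw [pickingNumbers_eq_maxF, pickingNumbers_alt_eq_maxF]
  exact foldl_maxF_eq (pvF arr) arr (PySem.Set.ofList arr)
    (fun x => (PySem.Set.mem_ofList arr x).symm)
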